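-- pv_equiv track=rewrite | github.com/Brok3nPix3l/leetcode | 2093-check-if-string-is-a-prefix-of-array/check-if-string-is-a-prefix-of-array.py | isPrefixString
-- ===== SOURCE A (Python) =====
-- from typing import List
--
-- def isPrefixString(s: str, words: List[str]) -> bool:
--     i = 0
--     wi = 0
--     for c in s:
--         if wi >= len(words) or words[wi][i] != c:
--             return False
--         i += 1
--         if i >= len(words[wi]):
--             wi += 1
--             i = 0
--
--     return i == 0
-- ===== SOURCE B (Python) =====
-- def isPrefixString(s, words):
--     prefix = ""
--     for w in words:
--         if len(prefix) >= len(s):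
--             break
--         prefix += w
--     return prefix == s
-- ===== Notes on version B (the rewrite author's own statement) =====
-- stated objective: simpler
-- what changed: Replaces A's per-character two-pointer scan over (word index, char index) with whole-word accumulation: concatenate words until the accumulated prefix reaches len(s), then a single equality check.
import Mathlib
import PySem

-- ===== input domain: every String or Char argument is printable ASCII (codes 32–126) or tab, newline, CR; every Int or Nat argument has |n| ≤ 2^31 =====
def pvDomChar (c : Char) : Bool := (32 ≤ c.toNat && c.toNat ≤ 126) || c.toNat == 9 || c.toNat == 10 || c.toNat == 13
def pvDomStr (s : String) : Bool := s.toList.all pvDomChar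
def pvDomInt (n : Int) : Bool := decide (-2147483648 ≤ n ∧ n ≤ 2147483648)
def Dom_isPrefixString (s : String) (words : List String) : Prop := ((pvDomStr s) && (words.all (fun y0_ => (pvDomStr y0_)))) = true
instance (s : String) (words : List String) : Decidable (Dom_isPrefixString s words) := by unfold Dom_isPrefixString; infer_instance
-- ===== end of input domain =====

-- B replaces A's per-character two-pointer scan by whole-word accumulation followed by one
-- equality check (objective: simpler).

-- ===== PORT A =====
-- A's for-loop over the characters of s with state (i, wi).  Both loop counters are always
-- ≥ 0 in A, so Nat counters are exact; `words[wi]? = none` is exactly Python's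
-- `wi >= len(words)` guard, and `w.toList[i]? = none` is exactly where Python raises
-- IndexError (i is kept < len(words[wi]) except on an empty word; excluded by Pre_).
def isPrefixStringLoop (words : List String) : List Char → Nat → Nat → Bool
  | [], i, _ => i == 0
  | c :: cs, i, wi =>
    match words[wi]? with
    | none => false                  -- wi >= len(words): return False
    | some w =>
      match w.toList[i]? with
      | none => false                -- Python raises IndexError here; outside Pre_
      | some ch =>
        if ch ≠ c then false         -- words[wi][i] != c: return False
        else if i + 1 ≥ w.toList.length then isPrefixStringLoop words cs 0 (wi + 1)
        else isPrefixStringLoop words cs (i + 1) wi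

def isPrefixString (s : String) (words : List String) : Bool :=
  isPrefixStringLoop words s.toList 0 0

-- ===== PORT B =====
-- B's loop: prefix = ""; for w in words: if len(prefix) >= len(s): break; prefix += w
def isPrefixStringAcc (sl : List Char) : List String → List Char → List Char
  | [], p => p
  | w :: ws, p => if sl.length ≤ p.length then p else isPrefixStringAcc sl ws (p ++ w.toList)

def isPrefixString_alt (s : String) (words : List String) : Bool :=
  isPrefixStringAcc s.toList words [] == s.toList

-- ===== PRECONDITION & SPEC =====
-- Pre_ excludes exactly the inputs on which A raises IndexError: an empty word whose
-- preceding words concatenate to a proper prefix of s (A indexes words[wi][0] on "").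
def Pre_isPrefixString (s : String) (words : List String) : Prop :=
  ∀ k, ∀ _ : k < words.length, words[k] = "" →
    ¬((((words.map String.toList).take k).flatten <+: s.toList) ∧
      (((words.map String.toList).take k).flatten).length < s.toList.length)

instance (s : String) (words : List String) : Decidable (Pre_isPrefixString s words) := by
  unfold Pre_isPrefixString; infer_instance

def pvWitness_isPrefixString : String × List String := ("ab", ["a", "b"])

def Spec_isPrefixString (s : String) (words : List String) (out : Bool) : Prop := out = isPrefixString_alt s words
instance (s : String) (words : List String) (out : Bool) : Decidable (Spec_isPrefixString s words out) := by unfold Spec_isPrefixString; infer_instance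

-- ===== CLAIM (what is proved, stated in full; the proofs are below) =====
def Claim_equal_isPrefixString : Prop := ∀ (s : String) (words : List String), Dom_isPrefixString s words → Pre_isPrefixString s words → Spec_isPrefixString s words (isPrefixString s words)

-- ===== LEMMAS AND PROOFS =====

-- Greedy word-eating spec: strip whole words off the front of sl; True when sl is exhausted.
def eatsB : List Char → List (List Char) → Bool
  | [], _ => true
  | _ :: _, [] => false
  | c :: cs, w :: ws => if w.isPrefixOf (c :: cs) then eatsB ((c :: cs).drop w.length) ws else false

-- eatsB applied mid-word: first finish the current word's remainder wd, then continue.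
def eatsW (sl wd : List Char) (ws : List (List Char)) : Bool :=
  if wd.isPrefixOf sl then eatsB (sl.drop wd.length) ws else false

-- "The greedy scan never reaches an empty word while characters remain" (A would raise).
def OkE : List Char → List (List Char) → Prop
  | [], _ => True
  | _ :: _, [] => True
  | c :: cs, w :: ws => w ≠ [] ∧ (w <+: (c :: cs) → OkE ((c :: cs).drop w.length) ws)

theorem append_prefix_iff (p q l : List Char) :
    p ++ q <+: l ↔ p <+: l ∧ q <+: l.drop p.length := by
  constructor
  · rintro ⟨t, ht⟩
    subst ht
    refine ⟨⟨q ++ t, by simp⟩, ?_⟩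
    rw [List.append_assoc, List.drop_left]
    exact ⟨t, rfl⟩
  · rintro ⟨hp, hq⟩
    have h1 : l = p ++ l.drop p.length := by
      nth_rewrite 1 [← List.take_append_drop p.length l]
      rw [← List.prefix_iff_eq_take.mp hp]
    obtain ⟨t, ht⟩ := hq
    exact ⟨t, by rw [h1, ← ht, List.append_assoc]⟩

theorem nobad_okE : ∀ (ws : List (List Char)) (sl : List Char),
    (∀ k, ∀ _ : k < ws.length, ws[k] = [] →
      ¬(((ws.take k).flatten <+: sl) ∧ ((ws.take k).flatten).length < sl.length)) →
    OkE sl ws := by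
  intro ws
  induction ws with
  | nil => intro sl _; cases sl <;> simp [OkE]
  | cons w t ih =>
    intro sl h
    cases sl with
    | nil => simp [OkE]
    | cons c cs =>
      refine ⟨?_, ?_⟩
      · intro hw
        exact h 0 (by simp) (by simpa using hw) (by simp)
      · intro hpre
        apply ih
        intro k hk hke hbad
        obtain ⟨hb1, hb2⟩ := hbad
        apply h (k + 1) (by simpa using Nat.succ_lt_succ hk) (by simpa using hke)
        constructor
        · rw [List.take_succ_cons, List.flatten_cons, append_prefix_iff]
          refine ⟨hpre, ?_⟩
          simpa using hb1
        · have hlen : ((t.take k).flatten).length < ((c :: cs).drop w.length).length := hb2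
          have hwl : w.length ≤ (c :: cs).length := hpre.length_le
          simp only [List.take_succ_cons, List.flatten_cons, List.length_append]
          simp only [List.length_drop] at hlen
          omega

theorem eatsB_cons (c : Char) (cs w : List Char) (ws : List (List Char)) :
    eatsB (c :: cs) (w :: ws) = eatsW (c :: cs) w ws := rfl

theorem eatsW_nil (sl : List Char) (t : List (List Char)) :
    eatsW sl [] t = eatsB sl t := by
  simp [eatsW, List.isPrefixOf]

theorem eatsW_cons (c : Char) (cs u : List Char) (t : List (List Char)) :
    eatsW (c :: cs) (c :: u) t = eatsW cs u t := by
  simp [eatsW, List.isPrefixOf, List.drop_succ_cons]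

theorem eatsW_ne (c a : Char) (h : a ≠ c) (cs u : List Char) (t : List (List Char)) :
    eatsW (c :: cs) (a :: u) t = false := by
  simp [eatsW, List.isPrefixOf, h]

theorem loopA_main (words : List String) :
    ∀ (rest : List Char) (i wi : Nat),
    (i = 0 ∨ (wi < words.length ∧ i < (words[wi]!).toList.length)) →
    (match i with
     | 0 => OkE rest ((words.drop wi).map String.toList)
     | _ + 1 => ((words[wi]!).toList.drop i) <+: rest →
         OkE (rest.drop ((words[wi]!).toList.length - i)) ((words.drop (wi + 1)).map String.toList)) →
    isPrefixStringLoop words rest i wi =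
      (match i with
       | 0 => eatsB rest ((words.drop wi).map String.toList)
       | _ + 1 => eatsW rest ((words[wi]!).toList.drop i) ((words.drop (wi + 1)).map String.toList)) := by
  intro rest
  induction rest with
  | nil =>
    intro i wi hv hok
    cases i with
    | zero => simp [isPrefixStringLoop, eatsB]
    | succ j =>
      rcases hv with h0 | ⟨hwi, hlt⟩
      · exact absurd h0 (Nat.succ_ne_zero j)
      · have hne : (words[wi]!).toList.drop (j + 1) ≠ [] := by
          intro h
          have := List.drop_eq_nil_iff.mp h
          omega
        simp only [isPrefixStringLoop, eatsW]
        rw [if_neg (by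
          intro hpf
          exact hne (List.prefix_nil.mp (List.isPrefixOf_iff_prefix.mp hpf)))]
        simp
  | cons c cs ih =>
    intro i wi hv hok
    by_cases hwi : wi < words.length
    case neg =>
      have hi0 : i = 0 := by
        rcases hv with h | ⟨h, _⟩
        · exact h
        · exact absurd h hwi
      subst hi0
      have hnone : words[wi]? = none := by
        rw [List.getElem?_eq_none]
        omega
      have hdrop : words.drop wi = [] := List.drop_eq_nil_iff.mpr (by omega)
      simp [isPrefixStringLoop, hnone, hdrop, eatsB]
    case pos =>
      have hsome : words[wi]? = some (words[wi]!) := by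
        rw [List.getElem?_eq_getElem hwi, getElem!_pos words wi hwi]
      cases i with
      | zero =>
        have hdropw : words.drop wi = words[wi]! :: words.drop (wi + 1) := by
          rw [getElem!_pos words wi hwi]
          exact List.drop_eq_getElem_cons hwi
        rw [hdropw, List.map_cons] at hok ⊢
        obtain ⟨hne, hcont⟩ := hok
        cases hT : (words[wi]!).toList with
        | nil => exact absurd hT hne
        | cons a as =>
          have hchar : (words[wi]!).toList[0]? = some a := by rw [hT]; rfl
          rw [hT] at hcont
          show isPrefixStringLoop words (c :: cs) 0 wi
            = eatsB (c :: cs) ((a :: as) :: (words.drop (wi + 1)).map String.toList)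
          rw [eatsB_cons]
          simp only [isPrefixStringLoop, hsome, hchar]
          by_cases hac : a = c
          case neg =>
            rw [if_pos hac, eatsW_ne c a hac]
          case pos =>
            subst hac
            by_cases hone : as = []
            · subst hone
              rw [if_neg (by simp), if_pos (by rw [hT]; simp)]
              have hok' : OkE cs ((words.drop (wi + 1)).map String.toList) := by
                have := hcont ⟨cs, rfl⟩
                simpa using this
              rw [ih 0 (wi + 1) (Or.inl rfl) hok']
              rw [eatsW_cons, eatsW_nil]
            · have hlen1 : ¬ (0 + 1 ≥ (words[wi]!).toList.length) := by
                rw [hT]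
                have : as.length ≠ 0 := fun h => hone (List.eq_nil_of_length_eq_zero h)
                simp only [List.length_cons, ge_iff_le]
                omega
              rw [if_neg (by simp), if_neg hlen1]
              have hok' : ((words[wi]!).toList.drop 1) <+: cs →
                  OkE (cs.drop ((words[wi]!).toList.length - 1))
                    ((words.drop (wi + 1)).map String.toList) := by
                intro hpf
                rw [hT] at hpf
                have h2 := hcont (List.cons_prefix_cons.mpr ⟨rfl, by simpa using hpf⟩)
                rw [hT]
                simp only [List.length_cons, List.drop_succ_cons, Nat.add_sub_cancel] at h2 ⊢
                exact h2
              rw [ih 1 wi (Or.inr ⟨hwi, by rw [hT]; simp [Nat.pos_of_ne_zero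
                (fun h => hone (List.eq_nil_of_length_eq_zero h))]⟩) hok']
              rw [hT, List.drop_succ_cons, List.drop_zero, eatsW_cons]
      | succ j =>
        rcases hv with h0 | ⟨_, hlt⟩
        · exact absurd h0 (Nat.succ_ne_zero j)
        set w : String := words[wi]! with hw
        have hdd : w.toList.drop (j + 1) = w.toList[j + 1] :: w.toList.drop (j + 2) :=
          List.drop_eq_getElem_cons hlt
        have hchar : w.toList[j + 1]? = some (w.toList[j + 1]) :=
          List.getElem?_eq_getElem hlt
        simp only [isPrefixStringLoop, hsome, hchar]
        by_cases hac : w.toList[j + 1] = c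
        · by_cases hend : j + 1 + 1 ≥ w.toList.length
          · have hnil : w.toList.drop (j + 2) = [] :=
              List.drop_eq_nil_iff.mpr (by omega)
            have hone : w.toList.drop (j + 1) = [c] := by
              rw [hdd, hac, hnil]
            rw [if_neg (by simp [hac]), if_pos hend]
            have hok' : OkE cs ((words.drop (wi + 1)).map String.toList) := by
              have := hok (by rw [hone]; exact ⟨cs, rfl⟩)
              rw [show w.toList.length - (j + 1) = 1 by omega] at this
              simpa using this
            rw [ih 0 (wi + 1) (Or.inl rfl) hok']
            rw [hone, eatsW_cons, eatsW_nil]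
          · rw [if_neg (by simp [hac]), if_neg hend]
            have hok' : (w.toList.drop (j + 2)) <+: cs →
                OkE (cs.drop (w.toList.length - (j + 2)))
                  ((words.drop (wi + 1)).map String.toList) := by
              intro hpf
              have := hok (by rw [hdd, hac]; exact List.cons_prefix_cons.mpr ⟨rfl, hpf⟩)
              rw [show w.toList.length - (j + 1)
                    = (w.toList.length - (j + 2)) + 1 by omega,
                List.drop_succ_cons] at this
              exact this
            have ihx := ih (j + 2) wi (Or.inr ⟨hwi, by rw [← hw]; omega⟩)
              (by rw [← hw]; exact hok')
            rw [← hw] at ihx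
            rw [ihx]
            rw [hdd, hac, eatsW_cons]
        · rw [if_pos hac]
          rw [hdd, eatsW_ne c _ hac]

theorem accB_eq (sl : List Char) : ∀ (ws : List String) (p : List Char),
    (isPrefixStringAcc sl ws p == sl) =
      (p.isPrefixOf sl && eatsB (sl.drop p.length) (ws.map String.toList)) := by
  intro ws
  induction ws with
  | nil =>
    intro p
    rw [Bool.eq_iff_iff]
    simp only [isPrefixStringAcc, beq_iff_eq, Bool.and_eq_true, List.isPrefixOf_iff_prefix,
      List.map_nil]
    constructor
    · rintro rfl
      exact ⟨List.prefix_refl p, by rw [List.drop_length]; rfl⟩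
    · rintro ⟨hp, he⟩
      cases h : sl.drop p.length with
      | nil =>
        have hlen := List.drop_eq_nil_iff.mp h
        have := hp.length_le
        exact hp.eq_of_length (by omega)
      | cons c cs => rw [h] at he; exact absurd he (by simp [eatsB])
  | cons w t ih =>
    intro p
    by_cases hlen : sl.length ≤ p.length
    · rw [Bool.eq_iff_iff]
      simp only [isPrefixStringAcc, if_pos hlen, beq_iff_eq, Bool.and_eq_true,
        List.isPrefixOf_iff_prefix]
      rw [List.drop_eq_nil_iff.mpr hlen]
      simp only [eatsB, and_true]
      constructor
      · rintro rfl; exact List.prefix_refl p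
      · intro hp; exact hp.eq_of_length (le_antisymm hp.length_le hlen)
    · have hlt : p.length < sl.length := by omega
      rw [isPrefixStringAcc, if_neg hlen, ih]
      rw [Bool.eq_iff_iff]
      simp only [Bool.and_eq_true, List.isPrefixOf_iff_prefix, List.length_append]
      obtain ⟨c, cs, hc⟩ : ∃ c cs, sl.drop p.length = c :: cs := by
        cases h : sl.drop p.length with
        | nil => exact absurd (List.drop_eq_nil_iff.mp h) (by omega)
        | cons c cs => exact ⟨c, cs, rfl⟩
      have hdd : sl.drop (p.length + w.toList.length) = (c :: cs).drop w.toList.length := by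
        rw [← hc, List.drop_drop, Nat.add_comm]
      rw [hc, hdd]
      simp only [List.map_cons, eatsB]
      constructor
      · rintro ⟨hpw, he⟩
        rw [append_prefix_iff] at hpw
        obtain ⟨hp, hw⟩ := hpw
        rw [hc] at hw
        exact ⟨hp, by rw [if_pos (List.isPrefixOf_iff_prefix.mpr hw)]; exact he⟩
      · rintro ⟨hp, he⟩
        by_cases hw : w.toList.isPrefixOf (c :: cs)
        · rw [if_pos hw] at he
          refine ⟨?_, he⟩
          rw [append_prefix_iff]
          exact ⟨hp, hc ▸ List.isPrefixOf_iff_prefix.mp hw⟩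
        · rw [if_neg hw] at he; exact absurd he (by simp)

-- ===== VERDICT (by name: the statement is the Claim_ definition above) =====
theorem isPrefixString_spec : Claim_equal_isPrefixString := by
  intro s words _ hpre
  show isPrefixString s words = isPrefixString_alt s words
  have hok : OkE s.toList (words.map String.toList) := by
    apply nobad_okE
    intro k hk hke hbad
    have hk' : k < words.length := by simpa using hk
    have hkw : words[k] = "" := by
      have h2 : words[k].toList = [] := by simpa using hke
      exact String.toList_inj.mp (by simpa using h2)
    exact hpre k hk' hkw hbad
  have hmain := loopA_main words s.toList 0 0 (Or.inl rfl) hok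
  have halt : (isPrefixStringAcc s.toList words [] == s.toList)
      = eatsB s.toList (words.map String.toList) := by
    rw [accB_eq]
    simp [List.isPrefixOf]
  unfold isPrefixString isPrefixString_alt
  rw [halt]
  exact hmain
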